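-- pv_equiv track=rewrite | github.com/SinisterSpatula/retropie_status_overlay | P3Controllers.py | _parseDeviceLink
-- ===== SOURCE A (Python) =====
-- def _parseDeviceLink(cmd_lines):
-- 	# the sixad driver maybe had a bug, sometime shoud be 2 link suck as:
-- 	# lr-x------ 1 root root 64 Jan 19 10:54 35 -> /dev/input/js0
-- 	# lr-x------ 1 root root 64 Jan 19 10:54 36 -> /dev/input/js1
-- 	# when the real js0 reconnected, it changed:
-- 	# lr-x------ 1 root root 64 Jan 19 10:54 35 -> /dev/input/js0 (deleted)
-- 	# lr-x------ 1 root root 64 Jan 19 10:54 36 -> /dev/input/js1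
-- 	ret = None
-- 	for line in cmd_lines:
-- 		if '/dev/input/js' in line:
-- 			if 'deleted' in line:
-- 				ret = line.split()[-2]
-- 				break
--
-- 			tmp = line.split()[-1]
-- 			if '/dev/input/js' in tmp:
-- 				if ret:
-- 					ret = ret + ',' + tmp
-- 				else:
-- 					ret = tmp
--
-- 	return ret
-- ===== SOURCE B (Python) =====
-- def _parseDeviceLink(cmd_lines):
--     lines = list(cmd_lines)
--     # First pass: a '(deleted)' js line wins outright.
--     for line in lines:
--         if '/dev/input/js' in line and 'deleted' in line:
--             return line.split()[-2]
--     # Otherwise collect every trailing js link target and join them.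
--     tokens = [l.split()[-1] for l in lines
--               if '/dev/input/js' in l and '/dev/input/js' in l.split()[-1]]
--     return ','.join(tokens) if tokens else None
-- ===== Notes on version B (the rewrite author's own statement) =====
-- stated objective: simpler
-- what changed: Replaces the single stateful accumulate-with-early-break loop (a nullable string grown with '+') by two targeted passes: find the first '(deleted)' js line, else collect all trailing js tokens and ','.join them.
import Mathlib
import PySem

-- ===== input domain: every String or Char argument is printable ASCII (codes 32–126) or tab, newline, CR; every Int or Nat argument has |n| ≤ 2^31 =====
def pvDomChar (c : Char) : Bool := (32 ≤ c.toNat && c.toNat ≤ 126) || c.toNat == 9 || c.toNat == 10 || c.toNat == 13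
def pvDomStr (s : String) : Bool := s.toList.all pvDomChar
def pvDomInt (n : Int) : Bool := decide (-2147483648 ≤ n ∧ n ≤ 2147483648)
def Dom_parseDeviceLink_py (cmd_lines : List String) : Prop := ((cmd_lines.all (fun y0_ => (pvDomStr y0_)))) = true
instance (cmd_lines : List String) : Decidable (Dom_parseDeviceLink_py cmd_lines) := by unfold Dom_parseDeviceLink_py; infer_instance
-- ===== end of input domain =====

-- B replaces A's single stateful accumulate-with-early-break loop by two targeted passes
-- (first '(deleted)' js line, else join of all trailing js tokens); objective: simpler.

-- ===== PORT A =====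
-- A's loop: state 'ret : Option String', break on the first line containing both
-- '/dev/input/js' and 'deleted'.  line.split()[-1] cannot raise in its branch (the line
-- contains the non-whitespace substring '/dev/input/js', so split() is nonempty), hence
-- '.getD ""' there is never the default; line.split()[-2] CAN raise (one-token line),
-- ported as the 'none => none' arm and excluded by Pre_.
def goA_parseDeviceLink : List String → Option String → Option String
  | [], ret => ret
  | line :: rest, ret =>
    if PySem.Str.isIn "/dev/input/js" line then
      if PySem.Str.isIn "deleted" line then
        match PySem.List.pyGet? (PySem.Str.split₀ line) (-2) with
        | some t => some t
        | none => none            -- Python raises IndexError here (outside Pre_)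
      else
        let tmp := (PySem.List.pyGet? (PySem.Str.split₀ line) (-1)).getD ""
        if PySem.Str.isIn "/dev/input/js" tmp then
          match ret with
          | some r => if r = "" then goA_parseDeviceLink rest (some tmp)
                      else goA_parseDeviceLink rest (some (r ++ "," ++ tmp))
          | none => goA_parseDeviceLink rest (some tmp)
        else goA_parseDeviceLink rest ret
    else goA_parseDeviceLink rest ret

def parseDeviceLink_py (cmd_lines : List String) : Option String :=
  goA_parseDeviceLink cmd_lines none

-- ===== PORT B =====
-- B-side helpers: the two predicates of Source B's two passes.
def pvDel (l : String) : Bool :=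
  PySem.Str.isIn "/dev/input/js" l && PySem.Str.isIn "deleted" l

-- the comprehension's element: last token of a js line, kept if it contains the js path
def pvTok (l : String) : Option String :=
  if PySem.Str.isIn "/dev/input/js" l then
    let t := (PySem.List.pyGet? (PySem.Str.split₀ l) (-1)).getD ""   -- split() nonempty here
    if PySem.Str.isIn "/dev/input/js" t then some t else none
  else none

def parseDeviceLink_py_alt (cmd_lines : List String) : Option String :=
  match cmd_lines.find? pvDel with
  | some line =>
    match PySem.List.pyGet? (PySem.Str.split₀ line) (-2) with
    | some t => some t
    | none => none                -- Python raises IndexError here (outside Pre_)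
  | none =>
    let tokens := cmd_lines.filterMap pvTok
    if tokens.isEmpty then none else some (PySem.Str.join "," tokens)

-- ===== PRECONDITION & SPEC =====
-- Pre_ excludes exactly the inputs on which Python raises IndexError: those whose FIRST
-- line containing both '/dev/input/js' and 'deleted' splits into fewer than two tokens
-- (both A and B evaluate that line's split()[-2]).
def Pre_parseDeviceLink_py (cmd_lines : List String) : Prop :=
  ((cmd_lines.find? pvDel).all (fun line => 2 ≤ (PySem.Str.split₀ line).length)) = true
instance (cmd_lines : List String) : Decidable (Pre_parseDeviceLink_py cmd_lines) := by
  unfold Pre_parseDeviceLink_py; infer_instance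

def pvWitness_parseDeviceLink_py : List String :=
  ["lr-x------ 1 root root 64 Jan 19 10:54 35 -> /dev/input/js0 (deleted)",
   "lr-x------ 1 root root 64 Jan 19 10:54 36 -> /dev/input/js1"]

def Spec_parseDeviceLink_py (cmd_lines : List String) (out : Option String) : Prop := out = parseDeviceLink_py_alt cmd_lines
instance (cmd_lines : List String) (out : Option String) : Decidable (Spec_parseDeviceLink_py cmd_lines out) := by unfold Spec_parseDeviceLink_py; infer_instance

-- ===== CLAIM (what is proved, stated in full; the proofs are below) =====
def Claim_equal_parseDeviceLink_py : Prop := ∀ (cmd_lines : List String), Dom_parseDeviceLink_py cmd_lines → Pre_parseDeviceLink_py cmd_lines → Spec_parseDeviceLink_py cmd_lines (parseDeviceLink_py cmd_lines)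

-- ===== LEMMAS AND PROOFS =====

-- A's accumulator 'ret' viewed as the join of the list of tokens collected so far.
def pvJoinAcc : List String → Option String
  | [] => none
  | t :: ts => some (PySem.Str.join "," (t :: ts))

-- what both programs compute, parametrised by the already-collected tokens
def pvFinish (acc : List String) (ls : List String) : Option String :=
  match ls.find? pvDel with
  | some line =>
    match PySem.List.pyGet? (PySem.Str.split₀ line) (-2) with
    | some t => some t
    | none => none
  | none =>
    match acc ++ ls.filterMap pvTok with
    | [] => none
    | t :: ts => some (PySem.Str.join "," (t :: ts))

lemma charsJoin_append_singleton (sep : List Char) :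
    ∀ (l : List (List Char)), l ≠ [] → ∀ t, PySem.Chars.join sep (l ++ [t]) =
      PySem.Chars.join sep l ++ sep ++ t := by
  intro l
  induction l with
  | nil => intro h; exact absurd rfl h
  | cons x xs ih =>
    intro _ t
    cases xs with
    | nil => simp [PySem.Chars.join_cons_cons, PySem.Chars.join_singleton]
    | cons y ys =>
      have := ih (by simp) t
      simp only [List.cons_append, PySem.Chars.join_cons_cons] at this ⊢
      simp [this]

lemma strJoin_append_singleton (x : String) (xs : List String) (t : String) :
    PySem.Str.join "," ((x :: xs) ++ [t]) = PySem.Str.join "," (x :: xs) ++ "," ++ t := by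
  rw [← String.toList_inj]
  simp only [PySem.Str.toList_join, String.toList_append, List.map_append, List.map_cons,
    List.map_nil]
  exact charsJoin_append_singleton _ _ (by simp) _

lemma strJoin_singleton (t : String) : PySem.Str.join "," [t] = t := by
  rw [← String.toList_inj]
  simp only [PySem.Str.toList_join, List.map_cons, List.map_nil, PySem.Chars.join_singleton]

lemma toList_ne_nil_of_ne_empty {s : String} (h : s ≠ "") : s.toList ≠ [] := by
  intro hl
  exact h (String.toList_inj.mp (by simp [hl]))

lemma strJoin_ne_empty (x : String) (xs : List String) (hx : x ≠ "") :
    PySem.Str.join "," (x :: xs) ≠ "" := by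
  intro h
  have hl := congrArg String.toList h
  rw [PySem.Str.toList_join, List.map_cons] at hl
  cases xs with
  | nil =>
    rw [List.map_nil, PySem.Chars.join_singleton] at hl
    exact toList_ne_nil_of_ne_empty hx (by simpa using hl)
  | cons y ys =>
    rw [List.map_cons, PySem.Chars.join_cons_cons] at hl
    have hl' : x.toList ++ ",".toList ++
        PySem.Chars.join ",".toList (y.toList :: List.map String.toList ys) = [] := by
      simpa using hl
    rcases List.append_eq_nil_iff.mp hl' with ⟨h1, -⟩
    rcases List.append_eq_nil_iff.mp h1 with ⟨h2, -⟩
    exact toList_ne_nil_of_ne_empty hx h2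

lemma tok_ne_empty {t : String} (h : PySem.Str.isIn "/dev/input/js" t = true) : t ≠ "" := by
  intro he; subst he; exact absurd h (by decide)

lemma goA_eq_finish :
    ∀ (ls acc : List String), (∀ t ∈ acc, t ≠ "") →
      goA_parseDeviceLink ls (pvJoinAcc acc) = pvFinish acc ls := by
  intro ls
  induction ls with
  | nil =>
    intro acc _
    cases acc <;>
      simp only [goA_parseDeviceLink, pvFinish, pvJoinAcc, List.find?_nil,
        List.filterMap_nil, List.append_nil]
  | cons line rest ih =>
    intro acc hacc
    cases hjs : PySem.Str.isIn "/dev/input/js" line with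
    | false =>
      have hp : pvDel line = false := by unfold pvDel; rw [hjs]; rfl
      have hf : pvTok line = none := by unfold pvTok; rw [hjs]; simp
      have lhs : goA_parseDeviceLink (line :: rest) (pvJoinAcc acc)
          = goA_parseDeviceLink rest (pvJoinAcc acc) := by
        simp only [goA_parseDeviceLink, hjs, Bool.false_eq_true, if_false]
      rw [lhs, ih acc hacc]
      unfold pvFinish
      rw [List.find?_cons_of_neg (by simp [hp]), List.filterMap_cons_none hf]
    | true =>
      cases hdel : PySem.Str.isIn "deleted" line with
      | true =>
        have hp : pvDel line = true := by unfold pvDel; rw [hjs, hdel]; rfl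
        have lhs : goA_parseDeviceLink (line :: rest) (pvJoinAcc acc)
            = match PySem.List.pyGet? (PySem.Str.split₀ line) (-2) with
              | some t => some t
              | none => none := by
          cases acc <;> simp only [goA_parseDeviceLink, pvJoinAcc, hjs, hdel, if_true]
        rw [lhs]
        unfold pvFinish
        rw [List.find?_cons_of_pos hp]
      | false =>
        have hp : pvDel line = false := by unfold pvDel; rw [hjs, hdel]; rfl
        have hnp : ¬ pvDel line = true := by simp [hp]
        cases htok : PySem.Str.isIn "/dev/input/js"
            ((PySem.List.pyGet? (PySem.Str.split₀ line) (-1)).getD "") with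
        | false =>
          have hf : pvTok line = none := by
            unfold pvTok; rw [hjs]
            simp only [if_pos rfl]
            rw [htok]; simp
          have lhs : goA_parseDeviceLink (line :: rest) (pvJoinAcc acc)
              = goA_parseDeviceLink rest (pvJoinAcc acc) := by
            cases acc <;>
              simp only [goA_parseDeviceLink, pvJoinAcc, hjs, hdel, htok,
                Bool.false_eq_true, if_true, if_false]
          rw [lhs, ih acc hacc]
          unfold pvFinish
          rw [List.find?_cons_of_neg hnp, List.filterMap_cons_none hf]
        | true =>
          have htne : ((PySem.List.pyGet? (PySem.Str.split₀ line) (-1)).getD "") ≠ "" :=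
            tok_ne_empty htok
          have hf : pvTok line
              = some ((PySem.List.pyGet? (PySem.Str.split₀ line) (-1)).getD "") := by
            unfold pvTok; rw [hjs]
            simp only [if_pos rfl]
            rw [htok]; simp
          cases acc with
          | nil =>
            have lhs : goA_parseDeviceLink (line :: rest) (pvJoinAcc [])
                = goA_parseDeviceLink rest
                    (some ((PySem.List.pyGet? (PySem.Str.split₀ line) (-1)).getD "")) := by
              simp only [goA_parseDeviceLink, pvJoinAcc, hjs, hdel, htok,
                Bool.false_eq_true, if_true, if_false]
            have hstep : (some ((PySem.List.pyGet? (PySem.Str.split₀ line) (-1)).getD ""))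
                = pvJoinAcc [((PySem.List.pyGet? (PySem.Str.split₀ line) (-1)).getD "")] := by
              simp only [pvJoinAcc, strJoin_singleton]
            rw [lhs, hstep, ih _ (by intro t ht; simp at ht; subst ht; exact htne)]
            unfold pvFinish
            rw [List.find?_cons_of_neg hnp, List.filterMap_cons_some hf]
            rfl
          | cons x xs =>
            have hxne : x ≠ "" := hacc x (by simp)
            have hjne : ¬ PySem.Str.join "," (x :: xs) = "" := strJoin_ne_empty x xs hxne
            have lhs : goA_parseDeviceLink (line :: rest) (pvJoinAcc (x :: xs))
                = goA_parseDeviceLink rest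
                    (some (PySem.Str.join "," (x :: xs) ++ "," ++
                      ((PySem.List.pyGet? (PySem.Str.split₀ line) (-1)).getD ""))) := by
              simp only [goA_parseDeviceLink, pvJoinAcc, hjs, hdel, htok,
                Bool.false_eq_true, if_true, if_false, if_neg hjne]
            have hstep : (some (PySem.Str.join "," (x :: xs) ++ "," ++
                  ((PySem.List.pyGet? (PySem.Str.split₀ line) (-1)).getD "")))
                = pvJoinAcc ((x :: xs) ++
                    [((PySem.List.pyGet? (PySem.Str.split₀ line) (-1)).getD "")]) := by
              simp only [pvJoinAcc, List.cons_append]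
              rw [← List.cons_append, strJoin_append_singleton]
            have hacc' : ∀ t ∈ (x :: xs) ++
                [((PySem.List.pyGet? (PySem.Str.split₀ line) (-1)).getD "")], t ≠ "" := by
              intro t ht
              rcases List.mem_append.mp ht with h | h
              · exact hacc t h
              · simp at h; subst h; exact htne
            rw [lhs, hstep, ih _ hacc']
            unfold pvFinish
            rw [List.find?_cons_of_neg hnp, List.filterMap_cons_some hf]
            cases hfind : rest.find? pvDel with
            | some l => rfl
            | none => simp [List.append_assoc]
          
lemma alt_eq_finish (ls : List String) : parseDeviceLink_py_alt ls = pvFinish [] ls := by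
  unfold parseDeviceLink_py_alt pvFinish
  cases h : ls.find? pvDel with
  | some line => rfl
  | none => cases hfm : ls.filterMap pvTok <;> simp

-- ===== VERDICT (by name: the statement is the Claim_ definition above) =====
theorem parseDeviceLink_py_spec : Claim_equal_parseDeviceLink_py := by
  intro ls _ _
  unfold Spec_parseDeviceLink_py parseDeviceLink_py
  rw [alt_eq_finish]
  exact goA_eq_finish ls [] (by simp)
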